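-- pv_equiv track=rewrite | github.com/AndyKQuinn/advent-of-code | day2/duplicate_finder.py | find_duplicate_subsequences
-- ===== SOURCE A (Python) =====
-- def find_duplicate_subsequences(number):
--     """
--     Check if the entire number is made up of a repeating pattern.
--
--     For example:
--     - 1122 = "11" repeated 2 times (pattern length 2)
--     - 123123 = "123" repeated 2 times (pattern length 3)
--     - 1111 = "1" repeated 4 times (pattern length 1)
--     - 101010 = "10" repeated 3 times (pattern length 2)
--
--     Args:
--         number: Can be an int or string of digits
--
--     Returns:
--         List of tuples (pattern, repetitions) for valid repeating patterns found
--     """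
--
--     digits = str(number)
--     length = len(digits)
--     patterns = []
--
--     if length <= 1:
--         return patterns
--
--     for pattern_len in range(1, length // 2 + 1):
--         # The length must be divisible by the pattern length
--         if length % pattern_len != 0:
--             continue
--
--         # Extract first chunk as the pattern
--         pattern = digits[:pattern_len]
--
--         is_valid = True
--         repetitions = length // pattern_len
--
--         for i in range(repetitions):
--             chunk = digits[i * pattern_len : (i + 1) * pattern_len]
--             if chunk != pattern:
--                 is_valid = False
--                 break
--
--         if is_valid and repetitions >= 2:
--             patterns.append((pattern, repetitions))
--
--     return patterns
-- ===== SOURCE B (Python) =====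
-- def find_duplicate_subsequences(number):
--     """Rotation test: the string is d-block repeating iff rotating it by d
--     leaves it unchanged, so the inner chunk loop disappears."""
--     digits = str(number)
--     n = len(digits)
--     return [(digits[:d], n // d)
--             for d in range(1, n // 2 + 1)
--             if n % d == 0 and digits[d:] + digits[:d] == digits]
-- ===== Notes on version B (the rewrite author's own statement) =====
-- stated objective: simpler
-- what changed: The inner chunk-by-chunk comparison loop with a break is replaced by a single rotation test (digits[d:] + digits[:d] == digits), turning the whole function into one list comprehension over the candidate lengths.
import Mathlib
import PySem

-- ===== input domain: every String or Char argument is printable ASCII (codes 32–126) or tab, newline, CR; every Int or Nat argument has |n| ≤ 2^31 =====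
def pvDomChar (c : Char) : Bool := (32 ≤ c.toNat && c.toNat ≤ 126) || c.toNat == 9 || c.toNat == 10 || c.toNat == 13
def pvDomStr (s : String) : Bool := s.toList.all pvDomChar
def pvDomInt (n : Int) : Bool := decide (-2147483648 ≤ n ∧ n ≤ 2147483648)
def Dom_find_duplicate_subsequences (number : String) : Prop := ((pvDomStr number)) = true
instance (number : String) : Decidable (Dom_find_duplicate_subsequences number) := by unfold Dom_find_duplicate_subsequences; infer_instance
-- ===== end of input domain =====

-- B replaces A's inner chunk-comparison loop by a single rotation test
-- (digits[d:] + digits[:d] == digits) inside one list comprehension; same cost, simpler code.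



-- ===== PORT A =====
-- inner loop: for i in range(repetitions): if chunk != pattern: is_valid = False; break
def pvAValid (digits pattern : List Char) (pattern_len : Int) : List Int → Bool
  | [] => true
  | i :: rest =>
      if PySem.List.slice digits (some (i * pattern_len)) (some ((i + 1) * pattern_len)) ≠ pattern
      then false
      else pvAValid digits pattern pattern_len rest

def find_duplicate_subsequences (number : String) : List (String × Int) :=
  let digits := number.toList
  let length : Int := digits.length
  let patterns : List (String × Int) := []
  if length ≤ 1 then patterns else
  (PySem.List.pyRange 1 (PySem.Int.floordiv length 2 + 1)).foldl
    (fun patterns pattern_len =>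
      if PySem.Int.mod length pattern_len ≠ 0 then patterns
      else
        let pattern := PySem.List.slice digits none (some pattern_len)
        let repetitions := PySem.Int.floordiv length pattern_len
        let is_valid := pvAValid digits pattern pattern_len (PySem.List.pyRange 0 repetitions)
        if is_valid ∧ repetitions ≥ 2 then patterns ++ [(String.ofList pattern, repetitions)]
        else patterns) patterns

-- ===== PORT B =====
-- B: one comprehension; the membership test is the rotation identity digits[d:] + digits[:d] == digits
def find_duplicate_subsequences_alt (number : String) : List (String × Int) :=
  let digits := number.toList
  let n : Int := digits.length
  (PySem.List.pyRange 1 (PySem.Int.floordiv n 2 + 1)).filterMap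
    (fun d =>
      if PySem.Int.mod n d = 0 ∧
         PySem.List.slice digits (some d) none ++ PySem.List.slice digits none (some d) = digits
      then some (String.ofList (PySem.List.slice digits none (some d)), PySem.Int.floordiv n d)
      else none)

-- ===== PRECONDITION & SPEC =====
def Spec_find_duplicate_subsequences (number : String) (out : List (String × Int)) : Prop := out = find_duplicate_subsequences_alt number
instance (number : String) (out : List (String × Int)) : Decidable (Spec_find_duplicate_subsequences number out) := by unfold Spec_find_duplicate_subsequences; infer_instance

-- ===== CLAIM (what is proved, stated in full; the proofs are below) =====
def Claim_equal_find_duplicate_subsequences : Prop := ∀ (number : String), Dom_find_duplicate_subsequences number → Spec_find_duplicate_subsequences number (find_duplicate_subsequences number)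

-- ===== LEMMAS AND PROOFS =====

-- generic: a comprehension-style filterMap is a map over a filter
theorem pv_filterMap_if {α β : Type} (f : α → β) (p : α → Prop) [DecidablePred p] (l : List α) :
    l.filterMap (fun d => if p d then some (f d) else none) =
      (l.filter (fun d => decide (p d))).map f := by
  induction l with
  | nil => rfl
  | cons a l ih => by_cases h : p a <;> simp [h, ih]

-- A's inner loop with break checks every chunk in the range
theorem pvAValid_iff (s pat : List Char) (d : Int) (l : List Int) :
    pvAValid s pat d l = true ↔
      ∀ i ∈ l, PySem.List.slice s (some (i * d)) (some ((i + 1) * d)) = pat := by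
  induction l with
  | nil => simp [pvAValid]
  | cons a l ih =>
      by_cases h : PySem.List.slice s (some (a * d)) (some ((a + 1) * d)) = pat <;>
        simp [pvAValid, h, ih]

-- dropping i blocks from a flattened replicate
theorem pv_drop_flatten_replicate {α : Type} (u : List α) (m i : Nat) (hi : i ≤ m) :
    (List.flatten (List.replicate m u)).drop (i * u.length) =
      List.flatten (List.replicate (m - i) u) := by
  induction i generalizing m with
  | zero => simp
  | succ i ih =>
      cases m with
      | zero => omega
      | succ m =>
          rw [List.replicate_succ, List.flatten_cons, Nat.succ_mul,
            Nat.add_comm (i * u.length) u.length, ← List.drop_drop,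
            List.drop_left, ih m (by omega)]
          simp

-- one unrolling of the rotation identity
theorem pv_rot_step (s : List Char) (k j : Nat)
    (hrot : s.drop k ++ s.take k = s) (hj : j + k ≤ s.length) :
    s.drop (k + j) ++ s.take k = s.drop j := by
  have h := congrArg (List.drop j) hrot
  rwa [List.drop_append, List.length_drop,
    Nat.sub_eq_zero_of_le (by omega : j ≤ s.length - k), List.drop_drop,
    List.drop_zero] at h

-- the rotation identity forces the string to be a power of its first block
theorem pv_rot_flatten (s : List Char) (k m : Nat)
    (hN : s.length = m * k) (hrot : s.drop k ++ s.take k = s) :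
    ∀ i ≤ m, s.drop ((m - i) * k) = List.flatten (List.replicate i (s.take k)) := by
  intro i
  induction i with
  | zero => intro _; rw [Nat.sub_zero, ← hN, List.drop_length]; rfl
  | succ i ih =>
      intro hi
      have e : k + (m - (i + 1)) * k = (m - i) * k := by
        have h1 : m - (i + 1) + 1 = m - i := by omega
        rw [← h1, Nat.succ_mul]
        omega
      have hle : (m - i) * k ≤ m * k := Nat.mul_le_mul_right _ (by omega)
      have hd := pv_rot_step s k ((m - (i + 1)) * k) hrot (by omega)
      rw [e, ih (by omega)] at hd
      rw [← hd, List.replicate_succ', List.flatten_append]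
      simp

-- chunk agreement forces the string to be a power of the block
theorem pv_chunks_flatten (u : List Char) (m : Nat) :
    ∀ s : List Char, s.length = m * u.length →
    (∀ i < m, (s.drop (i * u.length)).take u.length = u) →
    s = List.flatten (List.replicate m u) := by
  induction m with
  | zero =>
      intro s hl _
      rw [Nat.zero_mul] at hl
      rw [List.eq_nil_of_length_eq_zero hl]
      rfl
  | succ m ih =>
      intro s hl hch
      have hsm : (m + 1) * u.length = m * u.length + u.length := Nat.succ_mul m u.length
      have h0 := hch 0 (by omega)
      rw [Nat.zero_mul, List.drop_zero] at h0
      have hrest := ih (s.drop u.length)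
        (by rw [List.length_drop]; omega)
        (by
          intro i hi
          rw [List.drop_drop]
          have := hch (i + 1) (by omega)
          rwa [Nat.succ_mul i u.length, Nat.add_comm (i * u.length) u.length] at this)
      conv_lhs => rw [← List.take_append_drop u.length s]
      rw [h0, hrest, List.replicate_succ, List.flatten_cons]

-- chunk agreement is exactly the rotation identity (for a block length dividing the length)
theorem pv_key (s : List Char) (k m : Nat) (hm : 1 ≤ m)
    (hN : s.length = m * k) :
    ((∀ i < m, (s.drop (i * k)).take k = s.take k) ↔ s.drop k ++ s.take k = s) := by
  have hkN : k ≤ s.length := by nlinarith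
  have hu : (s.take k).length = k := by rw [List.length_take]; omega
  constructor
  · intro hch
    obtain ⟨t, rfl⟩ : ∃ t, m = t + 1 := ⟨m - 1, by omega⟩
    have hflat : s = List.flatten (List.replicate (t + 1) (s.take k)) := by
      apply pv_chunks_flatten (s.take k) (t + 1) s (by rw [hu]; omega)
      intro i hi
      rw [hu]
      exact hch i hi
    have h1 : s.drop k = List.flatten (List.replicate t (s.take k)) := by
      conv_lhs => rw [hflat]
      have := pv_drop_flatten_replicate (s.take k) (t + 1) 1 (by omega)
      rwa [hu, Nat.one_mul, Nat.add_sub_cancel] at this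
    conv_rhs => rw [hflat]
    rw [h1, List.replicate_succ', List.flatten_append, List.flatten_cons, List.flatten_nil,
      List.append_nil]
  · intro hrot i hi
    have := pv_rot_flatten s k m hN hrot (m - i) (by omega)
    rw [show m - (m - i) = i by omega] at this
    rw [this]
    cases h : m - i with
    | zero => omega
    | succ t =>
        rw [List.replicate_succ, List.flatten_cons, List.take_left' hu]

-- the per-candidate tests of A and B agree on the range
theorem pv_tests_agree (s : List Char) (N : Nat) (hN : s.length = N) (hN2 : 2 ≤ N)
    (d : Int) (hd1 : 1 ≤ d) (hd2 : d ≤ (N / 2 : Nat)) :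
    ((decide (PySem.Int.mod (N : Int) d = 0) &&
      pvAValid s (PySem.List.slice s none (some d)) d
        (PySem.List.pyRange 0 (PySem.Int.floordiv (N : Int) d)) &&
      decide (PySem.Int.floordiv (N : Int) d ≥ 2)) : Bool) =
    decide (PySem.Int.mod (N : Int) d = 0 ∧
      PySem.List.slice s (some d) none ++ PySem.List.slice s none (some d) = s) := by
  obtain ⟨k, rfl⟩ : ∃ k : Nat, d = (k : Int) := ⟨d.toNat, by omega⟩
  have hk1 : 1 ≤ k := by exact_mod_cast hd1
  have hk2 : k ≤ N / 2 := by exact_mod_cast hd2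
  by_cases hdvd : k ∣ N
  · obtain ⟨m, hm⟩ := hdvd
    have hm2 : 2 ≤ m := by
      by_contra h
      have : m = 0 ∨ m = 1 := by omega
      rcases this with rfl | rfl
      · rw [Nat.mul_zero] at hm; omega
      · rw [Nat.mul_one] at hm; omega
    have hmod : PySem.Int.mod (N : Int) (k : Int) = 0 := by
      rw [PySem.Int.mod_natCast, Nat.mod_eq_zero_of_dvd ⟨m, hm⟩]; rfl
    have hdiv : PySem.Int.floordiv (N : Int) (k : Int) = (m : Int) := by
      rw [PySem.Int.floordiv_natCast, hm, Nat.mul_div_cancel_left m (by omega)]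
    have hpat : PySem.List.slice s none (some (k : Int)) = s.take k := by
      rw [PySem.List.slice_to s (by positivity)]; simp
    have hfrom : PySem.List.slice s (some (k : Int)) none = s.drop k := by
      rw [PySem.List.slice_from s (by positivity)]; simp
    have hvalid : pvAValid s (s.take k) (k : Int) (PySem.List.pyRange 0 (m : Int)) = true ↔
        ∀ i < m, (s.drop (i * k)).take k = s.take k := by
      rw [pvAValid_iff]
      constructor
      · intro h i hi
        have := h (i : Int) (by rw [PySem.List.mem_pyRange_one]; constructor <;> [positivity; exact_mod_cast hi])
        rw [show ((i : Int) * (k : Int)) = ((i * k : Nat) : Int) by push_cast; ring,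
          show (((i : Int) + 1) * (k : Int)) = (((i + 1) * k : Nat) : Int) by push_cast; ring,
          PySem.List.slice_natCast] at this
        rw [← this]
        congr 1
        rw [Nat.succ_mul]
        omega
      · intro h i hi
        rw [PySem.List.mem_pyRange_one] at hi
        obtain ⟨j, rfl⟩ : ∃ j : Nat, i = (j : Int) := ⟨i.toNat, by omega⟩
        have hj : j < m := by exact_mod_cast hi.2
        rw [show ((j : Int) * (k : Int)) = ((j * k : Nat) : Int) by push_cast; ring,
          show (((j : Int) + 1) * (k : Int)) = (((j + 1) * k : Nat) : Int) by push_cast; ring,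
          PySem.List.slice_natCast, show (j + 1) * k - j * k = k by rw [Nat.succ_mul]; omega]
        exact h j hj
    have hkey := pv_key s k m (by omega) (by rw [hN, hm, Nat.mul_comm])
    have hd0 : decide (PySem.Int.mod (N : Int) (k : Int) = 0) = true := decide_eq_true hmod
    rw [hdiv, hpat, hfrom, hd0]
    have h2 : decide ((m : Int) ≥ 2) = true := decide_eq_true (by exact_mod_cast hm2)
    by_cases hrot : s.drop k ++ s.take k = s
    · have hv : pvAValid s (s.take k) (k : Int) (PySem.List.pyRange 0 (m : Int)) = true :=
        hvalid.mpr (hkey.mpr hrot)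
      rw [hv, h2]
      exact (decide_eq_true ⟨hmod, hrot⟩).symm
    · have hv : pvAValid s (s.take k) (k : Int) (PySem.List.pyRange 0 (m : Int)) = false :=
        Bool.eq_false_iff.mpr (fun h => hrot (hkey.mp (hvalid.mp h)))
      rw [hv, Bool.and_false, Bool.false_and]
      exact (decide_eq_false (fun h => hrot h.2)).symm
  · have hmod : PySem.Int.mod (N : Int) (k : Int) ≠ 0 := by
      intro h
      exact hdvd (by exact_mod_cast (PySem.Int.mod_eq_zero_iff_dvd (N : Int) (k : Int)).mp h)
    rw [decide_eq_false hmod, Bool.false_and, Bool.false_and]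
    exact (decide_eq_false (fun h => hmod h.1)).symm

-- the whole computation, stated on the underlying character list
theorem pv_main (s : List Char) :
    (if (s.length : Int) ≤ 1 then ([] : List (String × Int)) else
      (PySem.List.pyRange 1 (PySem.Int.floordiv (s.length : Int) 2 + 1)).foldl
        (fun patterns pattern_len =>
          if PySem.Int.mod (s.length : Int) pattern_len ≠ 0 then patterns
          else
            let pattern := PySem.List.slice s none (some pattern_len)
            let repetitions := PySem.Int.floordiv (s.length : Int) pattern_len
            let is_valid := pvAValid s pattern pattern_len (PySem.List.pyRange 0 repetitions)
            if is_valid ∧ repetitions ≥ 2 then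
              patterns ++ [(String.ofList pattern, repetitions)]
            else patterns) []) =
    (PySem.List.pyRange 1 (PySem.Int.floordiv (s.length : Int) 2 + 1)).filterMap
      (fun d =>
        if PySem.Int.mod (s.length : Int) d = 0 ∧
            PySem.List.slice s (some d) none ++ PySem.List.slice s none (some d) = s
        then some (String.ofList (PySem.List.slice s none (some d)),
          PySem.Int.floordiv (s.length : Int) d)
        else none) := by
  obtain ⟨N, hN⟩ : ∃ N, s.length = N := ⟨s.length, rfl⟩
  rw [hN]
  have hf : PySem.Int.floordiv (N : Int) 2 = ((N / 2 : Nat) : Int) := by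
    rw [show (2 : Int) = ((2 : Nat) : Int) by norm_num, PySem.Int.floordiv_natCast]
  rw [hf]
  by_cases hsmall : (N : Int) ≤ 1
  · have h2 : N / 2 = 0 := by omega
    rw [if_pos hsmall, h2]
    rfl
  · rw [if_neg hsmall]
    have hN2 : 2 ≤ N := by omega
    rw [pv_filterMap_if
      (fun d => (String.ofList (PySem.List.slice s none (some d)), PySem.Int.floordiv (N : Int) d))
      (fun d => PySem.Int.mod (N : Int) d = 0 ∧
        PySem.List.slice s (some d) none ++ PySem.List.slice s none (some d) = s)]
    have hbody : (fun (patterns : List (String × Int)) (pattern_len : Int) =>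
        if PySem.Int.mod (N : Int) pattern_len ≠ 0 then patterns
        else
          let pattern := PySem.List.slice s none (some pattern_len)
          let repetitions := PySem.Int.floordiv (N : Int) pattern_len
          let is_valid := pvAValid s pattern pattern_len (PySem.List.pyRange 0 repetitions)
          if is_valid ∧ repetitions ≥ 2 then
            patterns ++ [(String.ofList pattern, repetitions)]
          else patterns) =
        (fun acc x =>
          if (decide (PySem.Int.mod (N : Int) x = 0) &&
              pvAValid s (PySem.List.slice s none (some x)) x
                (PySem.List.pyRange 0 (PySem.Int.floordiv (N : Int) x)) &&
              decide (PySem.Int.floordiv (N : Int) x ≥ 2)) = true then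
            acc ++ [(String.ofList (PySem.List.slice s none (some x)),
              PySem.Int.floordiv (N : Int) x)]
          else acc) := by
      funext acc x
      by_cases h1 : PySem.Int.mod (N : Int) x = 0 <;>
        by_cases h2 : pvAValid s (PySem.List.slice s none (some x)) x
          (PySem.List.pyRange 0 (PySem.Int.floordiv (N : Int) x)) = true <;>
        by_cases h3 : PySem.Int.floordiv (N : Int) x ≥ 2 <;>
        simp [h1, h2, h3]
    rw [hbody, PySem.List.foldl_append_if
      (fun x => (decide (PySem.Int.mod (N : Int) x = 0) &&
        pvAValid s (PySem.List.slice s none (some x)) x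
          (PySem.List.pyRange 0 (PySem.Int.floordiv (N : Int) x)) &&
        decide (PySem.Int.floordiv (N : Int) x ≥ 2)))
      (fun x => (String.ofList (PySem.List.slice s none (some x)),
        PySem.Int.floordiv (N : Int) x))]
    rw [List.nil_append]
    congr 1
    apply List.filter_congr
    intro d hd
    rw [PySem.List.mem_pyRange_one] at hd
    exact pv_tests_agree s N hN hN2 d hd.1 (by omega)

-- ===== VERDICT (by name: the statement is the Claim_ definition above) =====
theorem find_duplicate_subsequences_spec : Claim_equal_find_duplicate_subsequences := by
  intro number _
  exact pv_main number.toList
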